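-- pv_equiv track=rewrite | github.com/ULG23/AdventOfCode2024 | day9.py | find_free_span
-- ===== SOURCE A (Python) =====
-- def find_free_span(disk, length):
--     """Find the leftmost span of free space of the given length."""
--     free_start = None
--     free_length = 0
--
--     for i, block in enumerate(disk):
--         if block == '.':
--             if free_start is None:
--                 free_start = i
--             free_length += 1
--             if free_length == length:
--                 return free_start
--         else:
--             free_start = None
--             free_length = 0
--
--     return None
-- ===== SOURCE B (Python) =====
-- def find_free_span(disk, length):
--     """Find the leftmost span of free space of the given length."""
--     if length <= 0:
--         return None
--     # Phase 1: index the maximal runs of '.' as (start, run_length).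
--     segments = []
--     n = len(disk)
--     i = 0
--     while i < n:
--         if disk[i] != '.':
--             i += 1
--             continue
--         j = i
--         while j < n and disk[j] == '.':
--             j += 1
--         segments.append((i, j - i))
--         i = j
--     # Phase 2: pick the first segment long enough.
--     for start, run in segments:
--         if run >= length:
--             return start
--     return None
-- ===== Notes on version B (the rewrite author's own statement) =====
-- stated objective: alternative
-- what changed: Replaces A's single pass with an incremental counter/early return by a two-phase structure: first build the list of maximal '.' runs as (start, run_length), then select the first run with run_length >= length.
import Mathlib
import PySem

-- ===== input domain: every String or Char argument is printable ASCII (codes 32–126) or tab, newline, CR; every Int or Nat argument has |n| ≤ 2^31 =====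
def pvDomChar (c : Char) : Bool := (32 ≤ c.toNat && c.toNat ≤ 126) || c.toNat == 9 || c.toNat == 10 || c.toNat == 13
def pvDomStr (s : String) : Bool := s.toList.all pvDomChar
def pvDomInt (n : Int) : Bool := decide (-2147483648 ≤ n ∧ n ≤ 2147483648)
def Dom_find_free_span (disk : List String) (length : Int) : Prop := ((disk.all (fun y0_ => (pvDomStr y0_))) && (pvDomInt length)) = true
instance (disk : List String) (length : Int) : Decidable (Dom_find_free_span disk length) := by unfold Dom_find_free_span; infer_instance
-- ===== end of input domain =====

-- B rebuilds the same answer by first indexing the maximal '.' runs as (start, run_length)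
-- and then selecting the first run with run_length >= length (objective: alternative decomposition).

-- ===== PORT A =====
-- A's for-loop over enumerate(disk) with state (free_start, free_length), early return.
def pvGoA (length : Int) : List String → Option Int → Int → Int → Option Int
  | [], _, _, _ => none
  | block :: rest, free_start, free_length, i =>
    if block = "." then
      let fs : Option Int := match free_start with | none => some i | some s => some s
      let fl : Int := free_length + 1
      if fl = length then fs
      else pvGoA length rest fs fl (i + 1)
    else pvGoA length rest none 0 (i + 1)

def find_free_span (disk : List String) (length : Int) : Option Int :=
  pvGoA length disk none 0 0

-- ===== PORT B =====
-- length of the leading run of '.' (Source B's inner `while j < n and disk[j] == '.'` scan)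
def pvRun : List String → Nat
  | [] => 0
  | b :: t => if b = "." then 1 + pvRun t else 0

-- Source B's outer while loop: the list of maximal '.' runs as (start, run_length)
def pvSegs : List String → Int → List (Int × Int)
  | [], _ => []
  | b :: rest, i =>
    if b = "." then
      let r := pvRun rest
      (i, (1 + r : Int)) :: pvSegs (rest.drop r) (i + 1 + r)
    else
      pvSegs rest (i + 1)
  termination_by l _ => l.length
  decreasing_by
    · simp
    · simp

-- Source B's selection loop: first segment with run ≥ length
def pvSelect (length : Int) : List (Int × Int) → Option Int
  | [] => none
  | (s, r) :: rest => if r ≥ length then some s else pvSelect length rest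

def find_free_span_alt (disk : List String) (length : Int) : Option Int :=
  if length ≤ 0 then none
  else pvSelect length (pvSegs disk 0)

-- ===== PRECONDITION & SPEC =====
def Spec_find_free_span (disk : List String) (length : Int) (out : Option Int) : Prop := out = find_free_span_alt disk length
instance (disk : List String) (length : Int) (out : Option Int) : Decidable (Spec_find_free_span disk length out) := by unfold Spec_find_free_span; infer_instance

-- ===== CLAIM (what is proved, stated in full; the proofs are below) =====
def Claim_equal_find_free_span : Prop := ∀ (disk : List String) (length : Int), Dom_find_free_span disk length → Spec_find_free_span disk length (find_free_span disk length)

-- ===== LEMMAS AND PROOFS =====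

-- With a nonpositive target, A's counter (kept ≥ 0) can never hit it, so A returns none.
lemma goA_nonpos (length : Int) (hlen : length ≤ 0) :
    ∀ (l : List String) (fs : Option Int) (fl i : Int), 0 ≤ fl →
      pvGoA length l fs fl i = none := by
  intro l
  induction l with
  | nil => intro fs fl i _; rfl
  | cons b rest ih =>
    intro fs fl i hfl
    simp only [pvGoA]
    split
    · have hne : ¬ (fl + 1 = length) := by omega
      simp only [hne, if_false]
      exact ih _ _ _ (by omega)
    · exact ih _ _ _ le_rfl

-- Mid-run invariant: inside a '.'-run with start s and count c (1 ≤ c < length),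
-- A returns s iff the rest of the run brings the count up to length.
lemma goA_run (length : Int) :
    ∀ (rest : List String) (s c i : Int), c < length →
      pvGoA length rest (some s) c i =
        (if c + (pvRun rest : Int) ≥ length then some s
         else pvGoA length (rest.drop (pvRun rest)) none 0 (i + pvRun rest)) := by
  intro rest
  induction rest with
  | nil =>
    intro s c i hc
    simp only [pvGoA, pvRun, List.drop_nil]
    rw [if_neg (by push_cast; omega)]
  | cons b t ih =>
    intro s c i hc
    by_cases hb : b = "."
    · subst hb
      simp only [pvGoA, pvRun, if_true]
      by_cases hhit : c + 1 = length
      · rw [if_pos hhit, if_pos (by push_cast; omega)]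
      · rw [if_neg hhit, ih s (c + 1) (i + 1) (by omega)]
        simp only [List.drop_succ_cons, Nat.add_comm 1 (pvRun t)]
        by_cases hge : c + 1 + (pvRun t : Int) ≥ length
        · rw [if_pos hge, if_pos (by push_cast; omega)]
        · rw [if_neg hge, if_neg (by push_cast; omega)]
          congr 1
          push_cast; ring
    · simp only [pvGoA, pvRun, if_neg hb]
      rw [if_neg (by omega : ¬ c + ((0:Nat):Int) ≥ length)]
      simp only [Nat.cast_zero, List.drop_zero, pvGoA, if_neg hb]
      norm_num

-- Main correspondence, out of a run, by strong induction on the list length.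
lemma goA_segs (length : Int) (hlen : 1 ≤ length) :
    ∀ (n : Nat) (l : List String) (i : Int), l.length = n →
      pvGoA length l none 0 i = pvSelect length (pvSegs l i) := by
  intro n
  induction n using Nat.strong_induction_on with
  | _ n ih =>
    intro l i hn
    match l with
    | [] => simp [pvGoA, pvSegs, pvSelect]
    | b :: rest =>
      by_cases hb : b = "."
      · subst hb
        simp only [pvGoA, if_true]
        rw [pvSegs]
        simp only [if_true, pvSelect]
        by_cases hhit : (0 : Int) + 1 = length
        · rw [if_pos hhit, if_pos (by omega)]
        · rw [if_neg hhit]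
          rw [show (0 : Int) + 1 = 1 from by norm_num]
          rw [goA_run length rest i 1 (i + 1) (by omega)]
          by_cases hge : ((1 : Int) + (pvRun rest : Int)) ≥ length
          · rw [if_pos (by omega), if_pos hge]
          · rw [if_neg (by omega), if_neg hge]
            have hlt : (rest.drop (pvRun rest)).length < n := by
              subst hn
              simp only [List.length_cons, List.length_drop]
              omega
            rw [ih _ hlt _ _ rfl]
      · simp only [pvGoA, if_neg hb]
        rw [pvSegs]
        simp only [if_neg hb]
        exact ih rest.length (by subst hn; simp) _ _ rfl

-- ===== VERDICT (by name: the statement is the Claim_ definition above) =====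
theorem find_free_span_spec : Claim_equal_find_free_span := by
  intro disk length _
  unfold Spec_find_free_span find_free_span find_free_span_alt
  by_cases hlen : length ≤ 0
  · rw [if_pos hlen, goA_nonpos length hlen disk none 0 0 le_rfl]
  · rw [if_neg hlen]
    exact goA_segs length (by omega) disk.length disk 0 rfl
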